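-- pv_equiv track=rewrite | github.com/ailabnjtech/cifar10 | tools.py | proportion
-- ===== SOURCE A (Python) =====
-- def proportion(a):
--     count=[]
--     for i in range(10):
--         num = 0
--         for j in range(len(a)):
--             if(a[j]==i):
--                 num +=1
--         count.append(num)
--     return count
-- ===== SOURCE B (Python) =====
-- def proportion(a):
--     freq = {}
--     for x in a:
--         freq[x] = freq.get(x, 0) + 1
--     return [freq.get(i, 0) for i in range(10)]
-- ===== Notes on version B (the rewrite author's own statement) =====
-- stated objective: idiomatic
-- what changed: Replaces the outer loop over the ten digits with its inner rescan of the list by a single pass building a frequency dict, then a constant-size read-out for digits 0-9.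
import Mathlib
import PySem

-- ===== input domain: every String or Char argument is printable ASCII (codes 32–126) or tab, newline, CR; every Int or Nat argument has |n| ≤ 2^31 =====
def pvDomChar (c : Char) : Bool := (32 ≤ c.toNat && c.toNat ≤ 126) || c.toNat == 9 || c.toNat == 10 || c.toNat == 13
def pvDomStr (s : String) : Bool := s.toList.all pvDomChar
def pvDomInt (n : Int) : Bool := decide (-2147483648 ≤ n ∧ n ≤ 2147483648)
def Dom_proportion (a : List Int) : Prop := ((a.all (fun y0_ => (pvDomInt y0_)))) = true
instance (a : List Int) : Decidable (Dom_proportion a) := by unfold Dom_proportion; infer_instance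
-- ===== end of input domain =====

-- B replaces A's ten rescans of the list with one frequency-dict pass and a constant-size read-out.

-- ===== PORT A =====
-- outer loop over range(10), inner loop over indices counting a[j]==i, appending each count
def proportion (a : List Int) : List Int :=
  (PySem.List.pyRange 0 10 1).foldl
    (fun count i =>
      let num := (PySem.List.pyRange 0 (PySem.List.len a) 1).foldl
        (fun num j => if PySem.List.pyGetD a j 0 = i then num + 1 else num) (0 : Int)
      count ++ [num]) []

-- ===== PORT B =====
-- one pass building freq = {x: multiplicity}, then [freq.get(i,0) for i in range(10)]
def proportion_alt (a : List Int) : List Int :=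
  let freq := a.foldl (fun d x => d.insert x (d.getD x 0 + 1)) (PySem.Dict.empty : PySem.Dict Int Int)
  (PySem.List.pyRange 0 10 1).map (fun i => freq.getD i 0)

-- ===== PRECONDITION & SPEC =====
def Spec_proportion (a : List Int) (out : List Int) : Prop := out = proportion_alt a
instance (a : List Int) (out : List Int) : Decidable (Spec_proportion a out) := by unfold Spec_proportion; infer_instance

-- ===== CLAIM (what is proved, stated in full; the proofs are below) =====
def Claim_equal_proportion : Prop := ∀ (a : List Int), Dom_proportion a → Spec_proportion a (proportion a)

-- ===== LEMMAS AND PROOFS =====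

-- a foldl that only appends is a map
theorem foldl_append_map {α β : Type} (f : α → β) (l : List α) (acc : List β) :
    l.foldl (fun c i => c ++ [f i]) acc = acc ++ l.map f := by
  induction l generalizing acc with
  | nil => simp
  | cons x xs ih => simp [List.foldl, ih]

-- counting fold equals List.count (with accumulator)
theorem foldl_count_eq {α : Type} [DecidableEq α] (i : α) (l : List α) (acc : Int) :
    l.foldl (fun n x => if x = i then n + 1 else n) acc = acc + l.count i := by
  induction l generalizing acc with
  | nil => simp
  | cons x xs ih =>
    simp only [List.foldl, List.count_cons, ih]
    by_cases h : x = i <;> simp [h] <;> ring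

-- ===== VERDICT (by name: the statement is the Claim_ definition above) =====
theorem proportion_spec : Claim_equal_proportion := by
  intro a _
  unfold Spec_proportion proportion proportion_alt
  rw [PySem.Dict.foldl_insert_getD_add_one_eq_counter]
  rw [foldl_append_map]
  simp only [List.nil_append]
  apply List.map_congr_left
  intro i _
  rw [PySem.List.foldl_pyRange_zero_pyGetD a 0 (fun n x => if x = i then n + 1 else n) 0,
      foldl_count_eq, PySem.Dict.getD_counter]
  simp
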